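-- pv_equiv track=rewrite | github.com/nicolas-lair/AidMe | src/UserGrammar/generator.py | _compute_possible_values_groups
-- ===== SOURCE A (Python) =====
-- def _compute_possible_values_groups(words):
--     possible_values_groups = []
--     group = []
--     start = 0
--     end = 0
--     s = 0
--     i = 0
--     while i <= len(words):
--         if i == len(words) or words[i] == " ":
--             l = []
--             j = s
--             while j < i:
--                 l.append(words[j])
--                 j = j + 1
--             start = s + _cleanup_begin(l)
--             l_size = len(l)
--             end = start + l_size - _cleanup_end(l) - 1
--             if len(l) > 0:
--                 value = ""
--                 k = start
--                 while k <= end: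
--                     value = value + words[k]
--                     k = k + 1
--                 group.append({'start_index': start, 'end_index': end})
--             s = i
--             if len(l) != l_size:
--                 possible_values_groups.append(group)
--                 group = []
--         i = i + 1
--     if len(group) > 0:
--         possible_values_groups.append(group)
--     return possible_values_groups
--
-- def _cleanup_end(l):
--     end = False
--     count = 0
--     while len(l) > 0 and not end:
--         e = l[len(l) - 1]
--         if e == " " or (len(e) == 1 and not e.isalnum()):
--             count = count + 1
--             del l[len(l) - 1]
--         else:
--             end = True
--     return count
--
-- def _cleanup_begin(l):
--     end = False
--     count = 0
--     while len(l) > 0 and not end: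
--         e = l[0]
--         if e == " " or (len(e) == 1 and not e.isalnum()):
--             count = count + 1
--             del l[0]
--         else:
--             end = True
--     return count
-- ===== SOURCE B (Python) =====
-- def _compute_possible_values_groups(words):
--     # Single pass with two-pointer trimming over index ranges; no slicing/list deletions,
--     # no value-building loop.
--     def _strip(e):
--         return e == " " or (len(e) == 1 and not e.isalnum())
--     groups = []
--     group = []
--     n = len(words)
--     s = 0
--     for i in range(n + 1):
--         if i == n or words[i] == " ":
--             lo = s
--             while lo < i and _strip(words[lo]):
--                 lo += 1
--             hi = i
--             while lo < hi and _strip(words[hi - 1]):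
--                 hi -= 1
--             if lo < hi:
--                 group.append({'start_index': lo, 'end_index': hi - 1})
--             if hi < i:
--                 groups.append(group)
--                 group = []
--             s = i
--     if group:
--         groups.append(group)
--     return groups
-- ===== Notes on version B (the rewrite author's own statement) =====
-- stated objective: faster
-- what changed: B makes a single pass keeping two index pointers per segment (trimming punctuation by advancing/retreating indices), instead of materialising each segment as a list, trimming it with repeated O(k) front/back deletions, and running a dead value-building loop.
import Mathlib
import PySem

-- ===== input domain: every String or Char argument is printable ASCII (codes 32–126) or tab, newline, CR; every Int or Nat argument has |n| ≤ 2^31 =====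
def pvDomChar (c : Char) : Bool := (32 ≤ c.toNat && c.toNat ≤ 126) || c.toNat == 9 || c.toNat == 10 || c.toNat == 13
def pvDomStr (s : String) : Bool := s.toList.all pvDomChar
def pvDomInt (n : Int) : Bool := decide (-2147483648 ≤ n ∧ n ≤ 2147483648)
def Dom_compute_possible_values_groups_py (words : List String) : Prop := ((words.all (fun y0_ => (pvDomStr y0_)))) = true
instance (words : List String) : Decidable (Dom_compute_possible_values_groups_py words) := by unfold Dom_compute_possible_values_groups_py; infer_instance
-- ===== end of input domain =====

-- B replaces A's per-segment list materialisation + repeated front/back deletions (+ a dead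
-- value-building loop) by a single pass with two index pointers per segment (objective: faster).

-- ===== PORT A =====

-- shared token test: e == " " or (len(e) == 1 and not e.isalnum())
def pvPunct (e : String) : Bool :=
  e == " " || (PySem.Str.len e == 1 && !(PySem.Str.strIsalnum e))

-- _cleanup_begin: returns (count, l after the deletions)
def pvCleanupBegin : List String → Int × List String
  | [] => (0, [])
  | e :: rest =>
    if pvPunct e then
      let p := pvCleanupBegin rest
      (p.1 + 1, p.2)
    else (0, e :: rest)

-- _cleanup_end: returns (count, l after the deletions)
def pvCleanupEnd (l : List String) : Int × List String :=
  if h : l = [] then (0, l)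
  else if pvPunct (l.getLast h) then
    let p := pvCleanupEnd l.dropLast
    (p.1 + 1, p.2)
  else (0, l)
termination_by l.length
decreasing_by
  have : l ≠ [] := h
  have : 0 < l.length := List.length_pos_iff.mpr this
  simp [List.length_dropLast]; omega

-- body of A's while-loop over i (state = (possible_values_groups, group, s))
def pvAStep (words : List String)
    (st : List (List (List (String × Int))) × List (List (String × Int)) × Int) (i : Int) :
    List (List (List (String × Int))) × List (List (String × Int)) × Int :=
  let (pvg, group, s) := st
  if i == (words.length : Int) || PySem.List.pyGetD words i "" == " " then
    let l := (PySem.List.pyRange s i 1).foldl (fun acc j => acc ++ [PySem.List.pyGetD words j ""]) []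
    let pb := pvCleanupBegin l
    let start := s + pb.1
    let l1 := pb.2
    let l_size : Int := l1.length
    let pe := pvCleanupEnd l1
    let end_ := start + l_size - pe.1 - 1
    let l2 := pe.2
    let group' :=
      if l2.length > 0 then
        -- value is built then never used in A; kept as a dead binding
        let _value := (PySem.List.pyRange start (end_ + 1) 1).foldl
          (fun v k => v ++ PySem.List.pyGetD words k "") ""
        group ++ [[("start_index", start), ("end_index", end_)]]
      else group
    if (l2.length : Int) ≠ l_size then (pvg ++ [group'], [], i) else (pvg, group', i)
  else (pvg, group, s)

def compute_possible_values_groups_py (words : List String) : List (List (List (String × Int))) :=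
  let fin := (PySem.List.pyRange 0 ((words.length : Int) + 1) 1).foldl (pvAStep words) ([], [], 0)
  if fin.2.1.length > 0 then fin.1 ++ [fin.2.1] else fin.1

-- ===== PORT B =====

-- advance lo over stripped tokens in words[lo:hi]
def pvTrimLeft (words : List String) (lo hi : Int) : Int :=
  if h : lo < hi ∧ pvPunct (PySem.List.pyGetD words lo "") then pvTrimLeft words (lo + 1) hi
  else lo
termination_by (hi - lo).toNat
decreasing_by omega

-- retreat hi over stripped tokens in words[lo:hi]
def pvTrimRight (words : List String) (lo hi : Int) : Int :=
  if h : lo < hi ∧ pvPunct (PySem.List.pyGetD words (hi - 1) "") then pvTrimRight words lo (hi - 1)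
  else hi
termination_by (hi - lo).toNat
decreasing_by omega

-- body of B's for-loop over i (state = (groups, group, s))
def pvBStep (words : List String)
    (st : List (List (List (String × Int))) × List (List (String × Int)) × Int) (i : Int) :
    List (List (List (String × Int))) × List (List (String × Int)) × Int :=
  let (groups, group, s) := st
  if i == (words.length : Int) || PySem.List.pyGetD words i "" == " " then
    let lo := pvTrimLeft words s i
    let hi := pvTrimRight words lo i
    let group' := if lo < hi then group ++ [[("start_index", lo), ("end_index", hi - 1)]] else group
    if hi < i then (groups ++ [group'], [], i) else (groups, group', i)
  else (groups, group, s)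

def compute_possible_values_groups_py_alt (words : List String) : List (List (List (String × Int))) :=
  let fin := (PySem.List.pyRange 0 ((words.length : Int) + 1) 1).foldl (pvBStep words) ([], [], 0)
  if fin.2.1.isEmpty then fin.1 else fin.1 ++ [fin.2.1]

-- ===== PRECONDITION & SPEC =====
def Spec_compute_possible_values_groups_py (words : List String) (out : List (List (List (String × Int)))) : Prop := out = compute_possible_values_groups_py_alt words
instance (words : List String) (out : List (List (List (String × Int)))) : Decidable (Spec_compute_possible_values_groups_py words out) := by unfold Spec_compute_possible_values_groups_py; infer_instance

-- ===== CLAIM (what is proved, stated in full; the proofs are below) =====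
def Claim_equal_compute_possible_values_groups_py : Prop := ∀ (words : List String), Dom_compute_possible_values_groups_py words → Spec_compute_possible_values_groups_py words (compute_possible_values_groups_py words)

-- ===== LEMMAS AND PROOFS =====

theorem pvTrimLeft_bounds (words : List String) (s i : Int) :
    s ≤ pvTrimLeft words s i ∧ pvTrimLeft words s i ≤ max s i := by
  rw [pvTrimLeft]
  split
  · rename_i h
    have ih := pvTrimLeft_bounds words (s + 1) i
    omega
  · omega
termination_by (i - s).toNat
decreasing_by omega

theorem pvTrimRight_bounds (words : List String) (lo i : Int) :
    min lo i ≤ pvTrimRight words lo i ∧ pvTrimRight words lo i ≤ i := by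
  rw [pvTrimRight]
  split
  · rename_i h
    have ih := pvTrimRight_bounds words lo (i - 1)
    omega
  · omega
termination_by (i - lo).toNat
decreasing_by omega

theorem pvBuild_eq (words : List String) (s i : Int) :
    (PySem.List.pyRange s i 1).foldl (fun acc j => acc ++ [PySem.List.pyGetD words j ""]) []
      = (PySem.List.pyRange s i 1).map (fun j => PySem.List.pyGetD words j "") := by
  simpa using PySem.List.foldl_append_singleton_eq_map
    (l := PySem.List.pyRange s i 1) (f := fun j => PySem.List.pyGetD words j "") (acc := [])

theorem pvCleanupBegin_eq (words : List String) (s i : Int) :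
    pvCleanupBegin ((PySem.List.pyRange s i 1).map (fun j => PySem.List.pyGetD words j ""))
      = (pvTrimLeft words s i - s,
         (PySem.List.pyRange (pvTrimLeft words s i) i 1).map (fun j => PySem.List.pyGetD words j "")) := by
  rw [pvTrimLeft]
  split
  · rename_i h'
    rw [PySem.List.pyRange_one_cons h'.1]
    simp only [List.map_cons, pvCleanupBegin, h'.2, if_true]
    rw [pvCleanupBegin_eq words (s + 1) i]
    simp only [Prod.mk.injEq]
    exact ⟨by omega, trivial⟩
  · rename_i h'
    by_cases h : s < i
    · have hp : ¬ pvPunct (PySem.List.pyGetD words s "") = true := fun hp => h' ⟨h, hp⟩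
      rw [PySem.List.pyRange_one_cons h]
      simp [pvCleanupBegin, hp]
    · rw [PySem.List.pyRange_one_eq_nil (by omega)]
      simp [pvCleanupBegin]
termination_by (i - s).toNat
decreasing_by omega

theorem pvCleanupEnd_concat (L : List String) (x : String) :
    pvCleanupEnd (L ++ [x]) =
      if pvPunct x then ((pvCleanupEnd L).1 + 1, (pvCleanupEnd L).2) else (0, L ++ [x]) := by
  rw [pvCleanupEnd]
  simp

theorem pvCleanupEnd_eq (words : List String) (lo i : Int) :
    pvCleanupEnd ((PySem.List.pyRange lo i 1).map (fun j => PySem.List.pyGetD words j ""))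
      = (i - pvTrimRight words lo i,
         (PySem.List.pyRange lo (pvTrimRight words lo i) 1).map (fun j => PySem.List.pyGetD words j "")) := by
  rw [pvTrimRight]
  split
  · rename_i h'
    have hsplit : PySem.List.pyRange lo i 1 = PySem.List.pyRange lo (i - 1) 1 ++ [i - 1] := by
      have h3 := PySem.List.pyRange_one_succ_right (a := lo) (b := i - 1) (by omega)
      have h2 : i - 1 + 1 = i := by omega
      rw [h2] at h3
      exact h3
    rw [hsplit]
    simp only [List.map_append, List.map_cons, List.map_nil]
    rw [pvCleanupEnd_concat]
    simp only [h'.2, if_true]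
    rw [pvCleanupEnd_eq words lo (i - 1)]
    simp only [Prod.mk.injEq]
    exact ⟨by omega, trivial⟩
  · rename_i h'
    by_cases h : lo < i
    · have hp : ¬ pvPunct (PySem.List.pyGetD words (i - 1) "") = true := fun hp => h' ⟨h, hp⟩
      have hsplit : PySem.List.pyRange lo i 1 = PySem.List.pyRange lo (i - 1) 1 ++ [i - 1] := by
        have h3 := PySem.List.pyRange_one_succ_right (a := lo) (b := i - 1) (by omega)
        have h2 : i - 1 + 1 = i := by omega
        rw [h2] at h3
        exact h3
      rw [hsplit]
      simp only [List.map_append, List.map_cons, List.map_nil]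
      rw [pvCleanupEnd_concat]
      simp [hp]
    · rw [PySem.List.pyRange_one_eq_nil (by omega), pvCleanupEnd]
      simp
termination_by (i - lo).toNat
decreasing_by omega

theorem pvStep_eq (words : List String) (st : List (List (List (String × Int))) × List (List (String × Int)) × Int) (i : Int) :
    pvAStep words st i = pvBStep words st i := by
  obtain ⟨pvg, group, s⟩ := st
  simp only [pvAStep, pvBStep]
  by_cases hc : (i == (words.length : Int) || PySem.List.pyGetD words i "" == " ") = true
  · simp only [hc, if_true]
    rw [pvBuild_eq, pvCleanupBegin_eq, pvCleanupEnd_eq]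
    have hb1 := pvTrimLeft_bounds words s i
    have hb2 := pvTrimRight_bounds words (pvTrimLeft words s i) i
    set tl := pvTrimLeft words s i with htl
    set tr := pvTrimRight words tl i with htr
    simp only [List.length_map, PySem.List.length_pyRange_one]
    have hG : (if 0 < (tr - tl).toNat then
          group ++ [[("start_index", s + (tl - s)),
            ("end_index", s + (tl - s) + ((i - tl).toNat : Int) - (i - tr) - 1)]]
        else group)
        = (if tl < tr then group ++ [[("start_index", tl), ("end_index", tr - 1)]] else group) := by
      by_cases hlt : tl < tr
      · rw [if_pos (by omega), if_pos hlt]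
        have hx : s + (tl - s) = tl := by omega
        rw [hx]
        have hy : tl + ((i - tl).toNat : Int) - (i - tr) - 1 = tr - 1 := by omega
        rw [hy]
      · rw [if_neg (by omega), if_neg hlt]
    rw [hG]
    by_cases hcl : tr < i
    · rw [if_pos (by omega), if_pos hcl]
    · rw [if_neg (by omega), if_neg hcl]
  · simp [hc]

-- ===== VERDICT (by name: the statement is the Claim_ definition above) =====
theorem compute_possible_values_groups_py_spec : Claim_equal_compute_possible_values_groups_py := by
  intro words _
  unfold Spec_compute_possible_values_groups_py
  unfold compute_possible_values_groups_py compute_possible_values_groups_py_alt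
  have h : pvAStep words = pvBStep words := funext fun st => funext fun i => pvStep_eq words st i
  rw [h]
  cases hfin : ((PySem.List.pyRange 0 ((words.length : Int) + 1) 1).foldl (pvBStep words) ([], [], 0)).2.1 <;>
    simp [hfin]
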